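-- pv_equiv track=rewrite | github.com/inboxdarpan/fastapi_demo | checkout.py | check_payment
-- ===== SOURCE A (Python) =====
-- def check_payment(timestamps, payments, limit):
--     result = []
--     pay_map = {}
--     for i, party in enumerate(payments):
--         party = str(party[0])+"_"+str(party[1])
--         time = timestamps[i]
--
--         if party in pay_map:
--             if time - pay_map[party] < limit:
--                 result.append(True)
--             else:
--                 result.append(False)
--         else:
--             result.append(False)
--         pay_map[party] = time
--     return result
-- ===== SOURCE B (Python) =====
-- def check_payment(timestamps, payments, limit):
--     # Pass 1: group the occurrence indices of each party key, in order.
--     groups = {}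
--     for i, party in enumerate(payments):
--         key = str(party[0]) + "_" + str(party[1])
--         groups.setdefault(key, []).append(i)
--     # Pass 2: within each group, flag an occurrence when it follows the
--     # previous occurrence of the same party by less than `limit`.
--     result = [False] * len(payments)
--     for idxs in groups.values():
--         for prev, cur in zip(idxs, idxs[1:]):
--             if timestamps[cur] - timestamps[prev] < limit:
--                 result[cur] = True
--     return result
-- ===== Notes on version B (the rewrite author's own statement) =====
-- stated objective: alternative
-- what changed: A's single sequential pass with a rolling last-timestamp dict is replaced by a two-pass group-and-mark scheme: pass 1 builds per-party-key ordered lists of occurrence indices, pass 2 walks each group's consecutive occurrence pairs and writes True back at the original positions of repeats within the limit.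
import Mathlib
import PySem

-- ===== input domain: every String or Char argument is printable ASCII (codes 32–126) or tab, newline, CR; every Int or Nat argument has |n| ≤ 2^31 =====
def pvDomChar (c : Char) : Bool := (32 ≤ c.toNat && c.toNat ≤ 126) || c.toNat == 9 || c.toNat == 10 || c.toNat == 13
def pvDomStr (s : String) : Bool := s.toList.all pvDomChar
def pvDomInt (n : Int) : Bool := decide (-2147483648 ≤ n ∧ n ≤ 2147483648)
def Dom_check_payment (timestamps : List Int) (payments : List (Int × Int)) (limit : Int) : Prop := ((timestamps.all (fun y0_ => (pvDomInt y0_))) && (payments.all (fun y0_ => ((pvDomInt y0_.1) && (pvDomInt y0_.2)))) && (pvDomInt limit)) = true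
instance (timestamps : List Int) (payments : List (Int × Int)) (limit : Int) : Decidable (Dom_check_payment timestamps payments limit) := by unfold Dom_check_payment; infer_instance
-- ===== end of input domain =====

-- B replaces A's single pass with a rolling last-time dict by a group-then-mark two-pass
-- scheme (per-party occurrence-index lists written back at the original positions);
-- objective: alternative (genuinely different traversal, similar cost).

-- ===== PORT A =====
-- party key "str(party[0]) + '_' + str(party[1])" (the identical expression appears in both
-- Python sources, so both ports share this helper)
def pvKey (p : Int × Int) : String := PySem.Int.toStr p.1 ++ "_" ++ PySem.Int.toStr p.2

def check_payment (timestamps : List Int) (payments : List (Int × Int)) (limit : Int) : List Bool :=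
  -- result/pay_map accumulator over `for i, party in enumerate(payments)`
  ((PySem.List.enumerate payments 0).foldl
    (fun (st : List Bool × PySem.Dict String Int) ip =>
      let party := pvKey ip.2
      let time := PySem.List.pyGetD timestamps ip.1 0   -- timestamps[i]; total form, exact under Pre_
      (if st.2.contains party then
         (if time - st.2.getD party 0 < limit then st.1 ++ [true] else st.1 ++ [false])
       else st.1 ++ [false],
       st.2.insert party time))
    ([], PySem.Dict.empty)).1

-- ===== PORT B =====
def check_payment_alt (timestamps : List Int) (payments : List (Int × Int)) (limit : Int) : List Bool :=
  -- pass 1: groups.setdefault(key, []).append(i)  ≡  groups[key] = groups.get(key, []) + [i]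
  let groups := (PySem.List.enumerate payments 0).foldl
    (fun (g : PySem.Dict String (List Int)) ip => g.modify (pvKey ip.2) [] (fun l => l ++ [ip.1]))
    PySem.Dict.empty
  -- pass 2: result = [False]*len(payments); mark repeats group by group
  let result := List.replicate payments.length false
  groups.values.foldl
    (fun r idxs =>
      -- zip(idxs, idxs[1:]) — idxs[1:] on a list is exactly `drop 1`
      (idxs.zip (idxs.drop 1)).foldl
        (fun r pq =>
          if PySem.List.pyGetD timestamps pq.2 0 - PySem.List.pyGetD timestamps pq.1 0 < limit
          then PySem.List.pySetD r pq.2 true else r)   -- result[cur] = True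
        r)
    result

-- ===== PRECONDITION & SPEC =====
-- Pre_: Python A evaluates timestamps[i] for every payment index i, so it raises IndexError
-- exactly when timestamps is shorter than payments; those inputs are excluded.
def Pre_check_payment (timestamps : List Int) (payments : List (Int × Int)) (limit : Int) : Prop :=
  payments.length ≤ timestamps.length
instance (timestamps : List Int) (payments : List (Int × Int)) (limit : Int) : Decidable (Pre_check_payment timestamps payments limit) := by unfold Pre_check_payment; infer_instance

def pvWitness_check_payment : List Int × (List (Int × Int)) × Int := ([0, 5, 7], [(1, 2), (1, 2), (3, 4)], 3)

def Spec_check_payment (timestamps : List Int) (payments : List (Int × Int)) (limit : Int) (out : List Bool) : Prop := out = check_payment_alt timestamps payments limit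
instance (timestamps : List Int) (payments : List (Int × Int)) (limit : Int) (out : List Bool) : Decidable (Spec_check_payment timestamps payments limit out) := by unfold Spec_check_payment; infer_instance

-- ===== CLAIM (what is proved, stated in full; the proofs are below) =====
def Claim_equal_check_payment : Prop := ∀ (timestamps : List Int) (payments : List (Int × Int)) (limit : Int), Dom_check_payment timestamps payments limit → Pre_check_payment timestamps payments limit → Spec_check_payment timestamps payments limit (check_payment timestamps payments limit)

-- ===== LEMMAS AND PROOFS =====

-- timestamps[j] as both ports read it
def pvTG (t : List Int) (j : Int) : Int := PySem.List.pyGetD t j 0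

-- the list of indices (counted from s) at which key k occurs in P
def pvOccS (P : List (Int × Int)) (s : Int) (k : String) : List Int :=
  ((PySem.List.enumerate P s).filter (fun ip => pvKey ip.2 == k)).map (fun ip => ip.1)

-- the entry appended for a payment p at global index n, given the prefix P before it
def pvEntry (t : List Int) (L : Int) (P : List (Int × Int)) (p : Int × Int) (n : Int) : Bool :=
  match (pvOccS P 0 (pvKey p)).getLast? with
  | some j => decide (pvTG t n - pvTG t j < L)
  | none => false

-- the common specification of both outputs
def pvSpec (t : List Int) (L : Int) (P : List (Int × Int)) : List Bool :=
  (List.range P.length).map (fun i => pvEntry t L (P.take i) (P.getD i (0, 0)) i)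

-- A's rolling dict, isolated
def pvDictA (t : List Int) (P : List (Int × Int)) : PySem.Dict String Int :=
  (PySem.List.enumerate P 0).foldl (fun d ip => d.insert (pvKey ip.2) (pvTG t ip.1)) PySem.Dict.empty

theorem pvOccS_append (X Y : List (Int × Int)) (s : Int) (k : String) :
    pvOccS (X ++ Y) s k = pvOccS X s k ++ pvOccS Y (s + X.length) k := by
  simp [pvOccS, PySem.List.enumerate_append]

theorem pvOccS_mem (P : List (Int × Int)) (s : Int) (k : String) (j : Int) (h : j ∈ pvOccS P s k) :
    ∃ m : Nat, ∃ hm : m < P.length, j = s + m ∧ pvKey P[m] = k := by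
  simp only [pvOccS, List.mem_map, List.mem_filter] at h
  obtain ⟨ip, ⟨hmem, hkey⟩, hj⟩ := h
  rw [PySem.List.mem_enumerate_iff] at hmem
  obtain ⟨m, hm, rfl⟩ := hmem
  exact ⟨m, hm, hj.symm, by simpa using hkey⟩

theorem pvOccS_singleton (p : Int × Int) (s : Int) (k : String) :
    pvOccS [p] s k = if pvKey p = k then [s] else [] := by
  by_cases h : pvKey p = k <;>
    simp [pvOccS, PySem.List.enumerate_cons, PySem.List.enumerate_nil, List.filter, h]

theorem pvDictA_snoc (t : List Int) (P : List (Int × Int)) (p : Int × Int) :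
    pvDictA t (P ++ [p]) = (pvDictA t P).insert (pvKey p) (pvTG t (0 + P.length)) := by
  simp [pvDictA, PySem.List.enumerate_append, List.foldl_append,
    PySem.List.enumerate_cons, PySem.List.enumerate_nil]

theorem pvDictA_get? (t : List Int) (P : List (Int × Int)) (k : String) :
    (pvDictA t P).get? k = ((pvOccS P 0 k).getLast?).map (fun j => pvTG t j) := by
  induction P using List.reverseRecOn with
  | nil => simp [pvDictA, pvOccS, PySem.List.enumerate_nil, PySem.Dict.get?_empty]
  | append_singleton P p ih =>
    rw [pvDictA_snoc, PySem.Dict.get?_insert, pvOccS_append, pvOccS_singleton]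
    by_cases hk : k = pvKey p
    · simp [hk]
    · simp [hk, Ne.symm hk, ih]

theorem pvSpec_snoc (t : List Int) (L : Int) (P : List (Int × Int)) (p : Int × Int) :
    pvSpec t L (P ++ [p]) = pvSpec t L P ++ [pvEntry t L P p P.length] := by
  unfold pvSpec
  rw [List.length_append, List.length_singleton, List.range_succ, List.map_append]
  congr 1
  · apply List.map_congr_left
    intro i hi
    rw [List.mem_range] at hi
    rw [List.take_append_of_le_length (le_of_lt hi), List.getD_append _ _ _ _ hi]
  · simp

theorem A_fold (t : List Int) (L : Int) (P : List (Int × Int)) :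
    (PySem.List.enumerate P 0).foldl
      (fun (st : List Bool × PySem.Dict String Int) ip =>
        let party := pvKey ip.2
        let time := PySem.List.pyGetD t ip.1 0
        (if st.2.contains party then
           (if time - st.2.getD party 0 < L then st.1 ++ [true] else st.1 ++ [false])
         else st.1 ++ [false],
         st.2.insert party time))
      ([], PySem.Dict.empty)
    = (pvSpec t L P, pvDictA t P) := by
  induction P using List.reverseRecOn with
  | nil => simp [PySem.List.enumerate_nil, pvSpec, pvDictA]
  | append_singleton P p ih =>
    rw [PySem.List.enumerate_append, List.foldl_append, ih,
      PySem.List.enumerate_cons, PySem.List.enumerate_nil]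
    simp only [List.foldl_cons, List.foldl_nil]
    rw [pvSpec_snoc, pvDictA_snoc]
    refine Prod.ext ?_ rfl
    simp only [PySem.Dict.contains_eq_isSome_get?, PySem.Dict.getD_eq_get?_getD, pvDictA_get?]
    unfold pvEntry
    cases h : (pvOccS P 0 (pvKey p)).getLast? with
    | none => simp [h, pvTG]
    | some j =>
      simp only [h, pvTG, Option.map_some, Option.isSome_some, if_true, Option.getD_some]
      split <;> rename_i hc <;>
        rw [zero_add, PySem.List.pyGetD_natCast, List.getD_eq_getElem?_getD] at hc <;>
        simp [hc]

theorem A_eq_spec (t : List Int) (P : List (Int × Int)) (L : Int) :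
    check_payment t P L = pvSpec t L P := by
  unfold check_payment
  rw [A_fold]

-- ---- B-side helpers ----

theorem pvOccS_cons (p : Int × Int) (D : List (Int × Int)) (s : Int) (k : String) :
    pvOccS (p :: D) s k =
      (if pvKey p = k then s :: pvOccS D (s + 1) k else pvOccS D (s + 1) k) := by
  by_cases h : pvKey p = k <;> simp [pvOccS, PySem.List.enumerate_cons, List.filter, h]

theorem pvSetD_natCast (r : List Bool) (m : Nat) (v : Bool) :
    PySem.List.pySetD r (m : Int) v = if m < r.length then r.set m v else r := by
  by_cases h : m < r.length <;>
    simp [PySem.List.pySetD, PySem.List.pySet?, PySem.List.pyIdx?, h]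

-- one inner marking pass, observed through getElem?
theorem pvMark_get? (t : List Int) (L : Int) (ps : List (Int × Int)) (r : List Bool) (i : Nat)
    (hpos : ∀ pq ∈ ps, ∃ m : Nat, pq.2 = (m : Int)) :
    (ps.foldl (fun r pq =>
        if PySem.List.pyGetD t pq.2 0 - PySem.List.pyGetD t pq.1 0 < L
        then PySem.List.pySetD r pq.2 true else r) r)[i]? =
    r[i]?.map (fun b => b || ps.any (fun pq => pq.2 == (i : Int) &&
        decide (PySem.List.pyGetD t pq.2 0 - PySem.List.pyGetD t pq.1 0 < L))) := by
  induction ps generalizing r with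
  | nil => cases h : r[i]? <;> simp [h]
  | cons pq ps ih =>
    obtain ⟨m, hm⟩ := hpos pq (List.mem_cons_self)
    rw [List.foldl_cons, ih _ (fun q hq => hpos q (List.mem_cons_of_mem _ hq))]
    by_cases hc : PySem.List.pyGetD t pq.2 0 - PySem.List.pyGetD t pq.1 0 < L
    · rw [if_pos hc, hm, pvSetD_natCast]
      by_cases hmi : m = i
      · subst hmi
        by_cases hlen : m < r.length
        · rw [if_pos hlen]
          have hc' : t[m]?.getD 0 - PySem.List.pyGetD t pq.1 0 < L := by
            rw [hm, PySem.List.pyGetD_natCast, List.getD_eq_getElem?_getD] at hc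
            exact hc
          simp [List.getElem?_set_self hlen, List.getElem?_eq_getElem hlen, hm, hc']
        · rw [if_neg hlen]
          have hnone : r[m]? = none := by
            simp [List.getElem?_eq_none_iff, le_of_not_gt hlen]
          simp [hnone]
      · have hset : (if m < r.length then r.set m true else r)[i]? = r[i]? := by
          split
          · exact List.getElem?_set_ne hmi
          · rfl
        rw [hset]
        have hbeq : (((m : Int)) == ((i : Int))) = false := by
          simpa using hmi
        cases h : r[i]? <;> simp [h, hm, hbeq]
    · rw [if_neg hc]
      cases h : r[i]? <;> simp [h, hc]

-- the outer pass over the group lists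
theorem pvOuter_get? (t : List Int) (L : Int) (vs : List (List Int)) (r : List Bool) (i : Nat)
    (hpos : ∀ l ∈ vs, ∀ j ∈ l, ∃ m : Nat, j = (m : Int)) :
    (vs.foldl (fun r idxs =>
        (idxs.zip (idxs.drop 1)).foldl (fun r pq =>
          if PySem.List.pyGetD t pq.2 0 - PySem.List.pyGetD t pq.1 0 < L
          then PySem.List.pySetD r pq.2 true else r) r) r)[i]? =
    r[i]?.map (fun b => b || vs.any (fun idxs =>
      (idxs.zip (idxs.drop 1)).any (fun pq => pq.2 == (i : Int) &&
        decide (PySem.List.pyGetD t pq.2 0 - PySem.List.pyGetD t pq.1 0 < L)))) := by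
  induction vs generalizing r with
  | nil => cases h : r[i]? <;> simp [h]
  | cons l vs ih =>
    rw [List.foldl_cons, ih _ (fun l' hl' => hpos l' (List.mem_cons_of_mem _ hl'))]
    have hl : ∀ pq ∈ l.zip (l.drop 1), ∃ m : Nat, pq.2 = (m : Int) := by
      intro pq hpq
      exact hpos l List.mem_cons_self pq.2 (List.mem_of_mem_drop (List.of_mem_zip hpq).2)
    rw [pvMark_get? t L _ r i hl]
    cases h : r[i]? <;> simp [h, Bool.or_assoc]

-- no pair of a self-zip has second component i when i is not in the tail
theorem pvZipAny_notmem (c : Int × Int → Bool) (i : Int) :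
    ∀ (X : List Int) (x : Int), i ∉ X →
      ((x :: X).zip X).any (fun pq => pq.2 == i && c pq) = false := by
  intro X
  induction X with
  | nil => intro x _; rfl
  | cons y Y ih =>
    intro x h
    have hy : (y == i) = false := by
      simp only [List.mem_cons, not_or] at h
      simp only [beq_eq_false_iff_ne]
      exact fun e => h.1 e.symm
    simp only [List.zip_cons_cons, List.any_cons, hy, Bool.false_and, Bool.false_or]
    exact ih y (fun hmem => h (List.mem_cons_of_mem _ hmem))

theorem pvZipAny_self_notmem (c : Int × Int → Bool) (i : Int) (l : List Int) (h : i ∉ l) :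
    (l.zip (l.drop 1)).any (fun pq => pq.2 == i && c pq) = false := by
  cases l with
  | nil => rfl
  | cons x X =>
    exact pvZipAny_notmem c i X x (fun hm => h (List.mem_cons_of_mem _ hm))

theorem pvZipAny_append_cons (c : Int × Int → Bool) (i : Int) :
    ∀ (A B : List Int), i ∉ A → i ∉ B →
      (((A ++ i :: B).zip ((A ++ i :: B).drop 1)).any (fun pq => pq.2 == i && c pq))
      = (match A.getLast? with
         | some a => c (a, i)
         | none => false) := by
  intro A
  induction A with
  | nil =>
    intro B _ hB
    simpa using pvZipAny_notmem c i B i hB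
  | cons a A' ih =>
    intro B hA hB
    have haA' : i ∉ A' := fun hm => hA (List.mem_cons_of_mem _ hm)
    have hai : (a == i) = false := by
      simp only [List.mem_cons, not_or] at hA
      simp only [beq_eq_false_iff_ne]
      exact fun e => hA.1 e.symm
    cases A' with
    | nil =>
      simp [List.getLast?, pvZipAny_notmem c i B i hB]
    | cons a' A'' =>
      have ha'i : (a' == i) = false := by
        simp only [List.mem_cons, not_or] at hA
        simp only [beq_eq_false_iff_ne]
        exact fun e => hA.2.1 e.symm
      rw [List.getLast?_cons_cons]
      rw [← ih B haA' hB]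
      simp [ha'i]

-- membership bound: every element of pvOccS T s k is s + an index below T.length
theorem pvOccS_lt (T : List (Int × Int)) (s : Int) (k : String) (j : Int) (h : j ∈ pvOccS T s k) :
    s ≤ j ∧ j < s + T.length := by
  obtain ⟨m, hm, rfl, _⟩ := pvOccS_mem T s k j h
  constructor <;> omega

-- the marking condition at index i collapses to the spec entry
theorem pvMarked_eq_entry (t : List Int) (L : Int) (P : List (Int × Int)) (i : Nat)
    (hi : i < P.length) :
    ((pvOccS P 0 (pvKey P[i])).zip ((pvOccS P 0 (pvKey P[i])).drop 1)).any
        (fun pq => pq.2 == (i : Int) &&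
          decide (PySem.List.pyGetD t pq.2 0 - PySem.List.pyGetD t pq.1 0 < L))
    = pvEntry t L (P.take i) P[i] (i : Int) := by
  have hP : P.take i ++ P[i] :: P.drop (i + 1) = P := by
    rw [List.getElem_cons_drop, List.take_append_drop]
  have hlen : (((P.take i).length : Int)) = (i : Int) := by
    simp [List.length_take, Nat.min_eq_left (le_of_lt hi)]
  have hdecomp := pvOccS_append (P.take i) (P[i] :: P.drop (i + 1)) 0 (pvKey P[i])
  rw [hP, pvOccS_cons, if_pos rfl, hlen, zero_add] at hdecomp
  have hA : (i : Int) ∉ pvOccS (P.take i) 0 (pvKey P[i]) := by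
    intro hmem
    have h2 := (pvOccS_lt _ _ _ _ hmem).2
    rw [zero_add, hlen] at h2
    omega
  have hB : ∀ s : Int, (i : Int) < s → (i : Int) ∉ pvOccS (P.drop (i + 1)) s (pvKey P[i]) := by
    intro s hs hmem
    have := (pvOccS_lt _ _ _ _ hmem).1
    omega
  rw [hdecomp, pvZipAny_append_cons _ _ _ _ hA (hB _ (by omega))]
  unfold pvEntry
  cases h : (pvOccS (P.take i) 0 (pvKey P[i])).getLast? <;>
    simp [h, pvTG, PySem.List.pyGetD_natCast, List.getD_eq_getElem?_getD]

-- group dictionary: lookups, keys, values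
theorem pvGroups_getD (P : List (Int × Int)) (k : String) :
    ((PySem.List.enumerate P 0).foldl
        (fun (g : PySem.Dict String (List Int)) ip => g.modify (pvKey ip.2) [] (fun l => l ++ [ip.1]))
        PySem.Dict.empty).getD k [] = pvOccS P 0 k := by
  have hmap : (PySem.List.enumerate P 0).foldl
      (fun (g : PySem.Dict String (List Int)) ip => g.modify (pvKey ip.2) [] (fun l => l ++ [ip.1]))
      PySem.Dict.empty
      = ((PySem.List.enumerate P 0).map (fun ip => (pvKey ip.2, ip.1))).foldl
        (fun d p => d.modify p.1 [] (fun x => x ++ [p.2])) PySem.Dict.empty := by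
    rw [List.foldl_map]
  rw [hmap, PySem.Dict.getD_foldl_modify_append]
  simp [pvOccS, List.filter_map, List.map_map, Function.comp_def]

theorem pvGroups_keys (P : List (Int × Int)) :
    ((PySem.List.enumerate P 0).foldl
        (fun (g : PySem.Dict String (List Int)) ip => g.modify (pvKey ip.2) [] (fun l => l ++ [ip.1]))
        PySem.Dict.empty).keys = PySem.Set.ofList (P.map pvKey) := by
  refine (PySem.Dict.keys_foldl_modify_key (PySem.List.enumerate P 0) (fun ip => pvKey ip.2)
    ([] : List Int) (fun _ ip l => l ++ [ip.1]) PySem.Dict.empty).trans ?_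
  rw [PySem.Dict.keys_empty]
  have : (PySem.List.enumerate P 0).map (fun ip => pvKey ip.2) = P.map pvKey := by
    rw [show (fun (ip : Int × (Int × Int)) => pvKey ip.2) = pvKey ∘ (fun ip => ip.2) from rfl,
      ← List.map_map, PySem.List.map_snd_enumerate]
  rw [this]
  rfl

theorem pvGroups_nodup (P : List (Int × Int)) :
    ((PySem.List.enumerate P 0).foldl
        (fun (g : PySem.Dict String (List Int)) ip => g.modify (pvKey ip.2) [] (fun l => l ++ [ip.1]))
        PySem.Dict.empty).keys.Nodup := by
  exact PySem.Dict.nodup_keys_foldl_modify_key (PySem.List.enumerate P 0) (fun ip => pvKey ip.2)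
    ([] : List Int) (fun _ ip l => l ++ [ip.1]) PySem.Dict.empty
    (by rw [PySem.Dict.keys_empty]; exact List.nodup_nil)

theorem pvAny_collapse (K : List String) (f : String → Bool) (k0 : String)
    (hmem : k0 ∈ K) (hother : ∀ k, k ≠ k0 → f k = false) : K.any f = f k0 := by
  cases h : f k0 with
  | true => exact List.any_eq_true.mpr ⟨k0, hmem, h⟩
  | false =>
    apply List.any_eq_false.mpr
    intro k hk
    by_cases hkk : k = k0
    · simp [hkk, h]
    · simp [hother k hkk]

theorem B_eq_spec (t : List Int) (P : List (Int × Int)) (L : Int) :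
    check_payment_alt t P L = pvSpec t L P := by
  unfold check_payment_alt
  dsimp only
  have hkeys := pvGroups_keys P
  have hnodup := pvGroups_nodup P
  have hvals := PySem.Dict.values_eq_map_keys _ hnodup []
  rw [hvals, hkeys]
  have hvalmap : (PySem.Set.ofList (P.map pvKey) : List String).map
      (fun k => ((PySem.List.enumerate P 0).foldl
        (fun (g : PySem.Dict String (List Int)) ip => g.modify (pvKey ip.2) [] (fun l => l ++ [ip.1]))
        PySem.Dict.empty).getD k [])
      = (PySem.Set.ofList (P.map pvKey) : List String).map (fun k => pvOccS P 0 k) := by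
    apply List.map_congr_left
    intro k _
    exact pvGroups_getD P k
  rw [hvalmap]
  apply List.ext_getElem?
  intro i
  rw [pvOuter_get?]
  · by_cases hi : i < P.length
    · have hrep : (List.replicate P.length false)[i]? = some false := by
        simp [hi]
      rw [hrep]
      have hany : (PySem.Set.ofList (P.map pvKey) : List String).any (fun k =>
          ((pvOccS P 0 k).zip ((pvOccS P 0 k).drop 1)).any (fun pq => pq.2 == (i : Int) &&
            decide (PySem.List.pyGetD t pq.2 0 - PySem.List.pyGetD t pq.1 0 < L)))
          = pvEntry t L (P.take i) P[i] (i : Int) := by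
        rw [pvAny_collapse _ _ (pvKey P[i])]
        · exact pvMarked_eq_entry t L P i hi
        · rw [PySem.Set.mem_ofList]
          exact List.mem_map_of_mem (List.getElem_mem hi)
        · intro k hk
          apply pvZipAny_self_notmem
          intro hmem
          obtain ⟨m, hm, hjm, hkey⟩ := pvOccS_mem P 0 k _ hmem
          have : m = i := by omega
          subst this
          exact hk hkey.symm
      unfold pvSpec
      rw [List.getElem?_map, List.getElem?_range hi]
      simp only [List.drop_one] at hany
      simp [hany, Function.comp_def, List.getElem?_eq_getElem hi, List.getD_eq_getElem?_getD]
    · have h1 : (List.replicate P.length false)[i]? = none := by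
        rw [List.getElem?_eq_none]
        simpa using le_of_not_gt hi
      have h2 : (pvSpec t L P)[i]? = none := by
        rw [List.getElem?_eq_none]
        simpa [pvSpec] using le_of_not_gt hi
      rw [h1, h2]
      rfl
  · intro l hl j hj
    rw [List.mem_map] at hl
    obtain ⟨k, _, rfl⟩ := hl
    obtain ⟨m, _, rfl, _⟩ := pvOccS_mem P 0 k j hj
    exact ⟨m, by omega⟩

-- ===== VERDICT (by name: the statement is the Claim_ definition above) =====
theorem check_payment_spec : Claim_equal_check_payment := by
  intro t P L _ _
  unfold Spec_check_payment
  rw [A_eq_spec, B_eq_spec]
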